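-- pv_equiv track=rewrite | github.com/HhSen/Open-AutoGLM | main.py | _is_phone_mode
-- ===== SOURCE A (Python) =====
-- def _is_phone_mode(argv: list[str]) -> bool:
--     """
--     Return True when the user invoked phone-control mode.
--
--     We look for the literal token 'phone' as the first non-flag positional
--     argument.  Flags start with '-'; their values are skipped.
--     """
--     skip_next = False
--     # Options that consume a following value token
--     value_flags = {
--         "--device-type",
--         "--device-id",
--         "-d",
--         "--wda-url",
--         "--base-url",
--         "--model",
--         "--apikey",
--         "--max-steps",
--         "--connect",
--         "-c",
--         "--disconnect",
--         "--enable-tcpip",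
--         "--lang",
--     }
--     for token in argv:
--         if skip_next:
--             skip_next = False
--             continue
--         if token in value_flags:
--             skip_next = True
--             continue
--         if token.startswith("-"):
--             continue
--         # First bare positional
--         return token == "phone"
--     return False
-- ===== SOURCE B (Python) =====
-- VALUE_FLAGS = {
--     "--device-type",
--     "--device-id",
--     "-d",
--     "--wda-url",
--     "--base-url",
--     "--model",
--     "--apikey",
--     "--max-steps",
--     "--connect",
--     "-c",
--     "--disconnect",
--     "--enable-tcpip",
--     "--lang",
-- }
--
--
-- def _first_positional(argv: list[str]):
--     """Recursively peel flags off the front; a value flag and its value go in one step."""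
--     if not argv:
--         return None
--     head = argv[0]
--     if head in VALUE_FLAGS:
--         return _first_positional(argv[2:])
--     if head.startswith("-"):
--         return _first_positional(argv[1:])
--     return head
--
--
-- def _is_phone_mode(argv: list[str]) -> bool:
--     return _first_positional(argv) == "phone"
-- ===== Notes on version B (the rewrite author's own statement) =====
-- stated objective: alternative
-- what changed: A is an iterative state machine with a skip_next boolean decided inside the loop; B has no skip state at all: a recursive helper peels flags off the front of the list, consuming a value flag together with its value in a single two-token step, and returns the first positional, which a separate top-level function then compares to 'phone'.
import Mathlib
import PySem

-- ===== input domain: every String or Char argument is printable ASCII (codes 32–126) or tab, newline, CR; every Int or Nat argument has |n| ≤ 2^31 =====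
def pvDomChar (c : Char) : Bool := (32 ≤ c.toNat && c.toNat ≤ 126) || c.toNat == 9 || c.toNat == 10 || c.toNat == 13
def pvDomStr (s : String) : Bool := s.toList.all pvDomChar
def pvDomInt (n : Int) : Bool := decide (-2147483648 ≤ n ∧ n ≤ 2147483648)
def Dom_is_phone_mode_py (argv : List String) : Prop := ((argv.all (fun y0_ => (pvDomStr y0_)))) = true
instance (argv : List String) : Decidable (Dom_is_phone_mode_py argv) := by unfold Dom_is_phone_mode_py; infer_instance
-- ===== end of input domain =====

-- B replaces A's skip_next state machine by a recursive first-positional finder that consumes a value flag and its value in one step; return-value equivalence only.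

-- ===== PORT A =====
-- the set literal 'value_flags' from A (a Python set of string literals)
def valueFlags : PySem.Set String := PySem.Set.ofList
  ["--device-type", "--device-id", "-d", "--wda-url", "--base-url", "--model",
   "--apikey", "--max-steps", "--connect", "-c", "--disconnect", "--enable-tcpip", "--lang"]

-- A's for-loop with the skip_next flag and the in-loop early return
def loopA : List String → Bool → Bool
  | [], _ => false
  | token :: ts, skipNext =>
    if skipNext then loopA ts false
    else if valueFlags.contains token then loopA ts true
    else if PySem.Str.startswith token "-" then loopA ts skipNext
    else token == "phone"

def is_phone_mode_py (argv : List String) : Bool := loopA argv false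

-- ===== PORT B =====
-- Source B's _first_positional: argv[2:] on a cons cell is the tail of the tail
def firstPos : List String → Option String
  | [] => none
  | head :: ts =>
    if valueFlags.contains head then firstPos ts.tail
    else if PySem.Str.startswith head "-" then firstPos ts
    else some head
decreasing_by
  · cases ts <;> simp <;> omega
  · simp

def is_phone_mode_py_alt (argv : List String) : Bool := firstPos argv == some "phone"

-- ===== PRECONDITION & SPEC =====
def Spec_is_phone_mode_py (argv : List String) (out : Bool) : Prop := out = is_phone_mode_py_alt argv
instance (argv : List String) (out : Bool) : Decidable (Spec_is_phone_mode_py argv out) := by unfold Spec_is_phone_mode_py; infer_instance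

-- ===== CLAIM =====
def Claim_equal_is_phone_mode_py : Prop := ∀ (argv : List String), Dom_is_phone_mode_py argv → Spec_is_phone_mode_py argv (is_phone_mode_py argv)

-- ===== LEMMAS AND PROOFS =====

-- A's loop (started with skip_next = False) computes the 'first positional == phone' test
theorem loopA_eq : ∀ (n : ℕ) (ts : List String), ts.length ≤ n →
    loopA ts false = (firstPos ts == some "phone") := by
  intro n
  induction n with
  | zero =>
    intro ts h
    have : ts = [] := List.length_eq_zero_iff.mp (Nat.le_zero.mp h)
    subst this; simp [loopA, firstPos]
  | succ n ih =>
    intro ts h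
    match ts with
    | [] => simp [loopA, firstPos]
    | t :: ts =>
      simp only [loopA, firstPos, if_neg (Bool.false_ne_true)]
      split_ifs with h1 h2
      · -- value flag: A sets skip_next, B drops two tokens
        match ts with
        | [] => simp [loopA, firstPos]
        | v :: rest =>
          simp only [loopA, List.tail_cons]
          exact ih rest (by simpa using Nat.le_of_succ_le_succ (Nat.le_of_succ_le h))
      · exact ih ts (Nat.le_of_succ_le_succ h)
      · rfl

-- ===== VERDICT =====
theorem is_phone_mode_py_spec : Claim_equal_is_phone_mode_py := by
  intro argv _
  unfold Spec_is_phone_mode_py is_phone_mode_py is_phone_mode_py_alt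
  exact loopA_eq argv.length argv (le_refl _)
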